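-- pv_equiv track=rewrite | github.com/AlbertHerrera/pythonProject | Dia5/Interaccion_Funciones.py | reducir_lista
-- ===== SOURCE A (Python) =====
-- def reducir_lista(lista):
--     lista_reducida = []
--     for n in lista:
--         if n not in lista_reducida:
--             lista_reducida.append(n)
--     numero_maximo = max(lista_reducida)
--     lista_reducida.pop(lista_reducida.index(numero_maximo))
--     return lista_reducida
-- ===== SOURCE B (Python) =====
-- def reducir_lista(lista):
--     numero_maximo = max(lista)
--     lista_reducida = []
--     for n in lista:
--         if n != numero_maximo and n not in lista_reducida:
--             lista_reducida.append(n)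
--     return lista_reducida
-- ===== Notes on version B (the rewrite author's own statement) =====
-- stated objective: simpler
-- what changed: B computes max(lista) up front and folds the max-removal into the single dedup pass as a guard, eliminating A's separate max/index/pop phase over the deduplicated list.
import Mathlib
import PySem

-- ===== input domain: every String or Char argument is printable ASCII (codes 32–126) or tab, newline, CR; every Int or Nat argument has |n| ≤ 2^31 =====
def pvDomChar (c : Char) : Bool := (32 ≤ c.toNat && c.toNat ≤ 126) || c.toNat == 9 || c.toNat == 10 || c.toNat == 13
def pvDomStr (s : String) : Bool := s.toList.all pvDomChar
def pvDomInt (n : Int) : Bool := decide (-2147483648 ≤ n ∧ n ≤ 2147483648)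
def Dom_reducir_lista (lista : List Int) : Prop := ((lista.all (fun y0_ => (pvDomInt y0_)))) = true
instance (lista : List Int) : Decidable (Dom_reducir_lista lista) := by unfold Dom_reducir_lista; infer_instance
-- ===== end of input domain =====

-- B folds the max-removal into the single order-preserving dedup pass (max computed up front),
-- removing A's separate max/index/pop phase; same return value on every non-empty list.

-- ===== PORT A =====
-- A: dedup by membership loop, then max over the deduped list, then pop at index of the max.
def pvDedupA (lista : List Int) : List Int :=
  lista.foldl (fun acc n => if n ∈ acc then acc else acc ++ [n]) []

def reducir_lista (lista : List Int) : List Int :=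
  match PySem.List.max? (pvDedupA lista) (fun y => y) with
  | none => []        -- unreachable under Pre_ (max([]) raises ValueError)
  | some m =>
    match PySem.List.index? (pvDedupA lista) m with
    | none => pvDedupA lista     -- unreachable: the max is a member
    | some i =>
      match PySem.List.pop? (pvDedupA lista) (i : Int) with
      | none => pvDedupA lista   -- unreachable: index? is in range
      | some r => r.2

-- ===== PORT B =====
-- B: max of the input first, then one dedup pass that also skips the max.
def reducir_lista_alt (lista : List Int) : List Int :=
  match PySem.List.max? lista (fun y => y) with
  | none => []        -- unreachable under Pre_ (max([]) raises ValueError)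
  | some numero_maximo =>
    lista.foldl
      (fun acc n => if n ≠ numero_maximo ∧ n ∉ acc then acc ++ [n] else acc) []

-- ===== PRECONDITION & SPEC =====
-- Pre_ excludes only the empty list, on which both A and B raise ValueError via max([]).
def Pre_reducir_lista (lista : List Int) : Prop := lista ≠ []
instance (lista : List Int) : Decidable (Pre_reducir_lista lista) := by
  unfold Pre_reducir_lista; infer_instance
def pvWitness_reducir_lista : List Int := [3, 1, 3, 2]

def Spec_reducir_lista (lista : List Int) (out : List Int) : Prop := out = reducir_lista_alt lista
instance (lista : List Int) (out : List Int) : Decidable (Spec_reducir_lista lista out) := by unfold Spec_reducir_lista; infer_instance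

-- ===== CLAIM (what is proved, stated in full; the proofs are below) =====
def Claim_equal_reducir_lista : Prop := ∀ (lista : List Int), Dom_reducir_lista lista → Pre_reducir_lista lista → Spec_reducir_lista lista (reducir_lista lista)

-- ===== LEMMAS AND PROOFS =====

-- membership in A's dedup fold
theorem pv_mem_dedup_fold (l : List Int) (acc : List Int) (x : Int) :
    x ∈ l.foldl (fun acc n => if n ∈ acc then acc else acc ++ [n]) acc ↔ x ∈ acc ∨ x ∈ l := by
  induction l generalizing acc with
  | nil => simp
  | cons n t ih =>
    simp only [List.foldl_cons]
    by_cases hn : n ∈ acc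
    · simp [hn, ih]
      constructor
      · rintro (h | h)
        · exact Or.inl h
        · exact Or.inr (Or.inr h)
      · rintro (h | h | h)
        · exact Or.inl h
        · exact Or.inl (h ▸ hn)
        · exact Or.inr h
    · simp [hn, ih, List.mem_append, or_assoc]

-- A's dedup fold keeps the accumulator duplicate-free
theorem pv_nodup_dedup_fold (l : List Int) (acc : List Int) (h : acc.Nodup) :
    (l.foldl (fun acc n => if n ∈ acc then acc else acc ++ [n]) acc).Nodup := by
  induction l generalizing acc with
  | nil => simpa
  | cons n t ih =>
    simp only [List.foldl_cons]
    by_cases hn : n ∈ acc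
    · simpa [hn] using ih acc h
    · refine ih _ ?_
      rw [if_neg hn, List.nodup_append]
      refine ⟨h, by simp, ?_⟩
      intro a ha b hb hab
      simp only [List.mem_singleton] at hb
      exact hn ((hab.trans hb) ▸ ha)

-- B's guarded fold equals A's dedup fold filtered by (· ≠ m)
theorem pv_guarded_eq_filter (m : Int) (l : List Int) (acc : List Int) :
    l.foldl (fun acc n => if n ≠ m ∧ n ∉ acc then acc ++ [n] else acc)
        (acc.filter (fun n => decide (n ≠ m)))
      = (l.foldl (fun acc n => if n ∈ acc then acc else acc ++ [n]) acc).filter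
          (fun n => decide (n ≠ m)) := by
  induction l generalizing acc with
  | nil => rfl
  | cons n t ih =>
    simp only [List.foldl_cons]
    by_cases hm : n = m
    · subst hm
      by_cases hn : n ∈ acc
      · simpa [hn] using ih acc
      · have : (acc ++ [n]).filter (fun x => decide (x ≠ n)) =
            acc.filter (fun x => decide (x ≠ n)) := by simp
        simpa [hn, this] using ih (acc ++ [n])
    · by_cases hn : n ∈ acc
      · have hmem : n ∈ acc.filter (fun x => decide (x ≠ m)) := by
          simp [List.mem_filter, hn, hm]
        simpa [hn, hmem, hm] using ih acc
      · have hmem : n ∉ acc.filter (fun x => decide (x ≠ m)) := by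
          simp [List.mem_filter, hn]
        have : (acc ++ [n]).filter (fun x => decide (x ≠ m)) =
            acc.filter (fun x => decide (x ≠ m)) ++ [n] := by simp [hm]
        simpa [hn, hmem, hm, this] using ih (acc ++ [n])

-- eraseIdx at the split point
theorem pv_eraseIdx_append (pre suf : List Int) (v : Int) :
    (pre ++ v :: suf).eraseIdx pre.length = pre ++ suf := by
  induction pre with
  | nil => rfl
  | cons a t ih => simp [ih]

-- filtering out an absent element is the identity
theorem pv_filter_of_not_mem (l : List Int) (m : Int) (h : m ∉ l) :
    l.filter (fun n => !decide (n = m)) = l := by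
  induction l with
  | nil => rfl
  | cons a t ih =>
    simp only [List.mem_cons, not_or] at h
    rw [List.filter_cons]
    simp only [ih h.2]
    have : ¬a = m := fun he => h.1 he.symm
    simp [this]

-- ===== VERDICT (by name: the statement is the Claim_ definition above) =====
theorem reducir_lista_spec : Claim_equal_reducir_lista := by
  intro lista _ hpre
  unfold Spec_reducir_lista reducir_lista reducir_lista_alt
  set red := pvDedupA lista with hred
  rw [pvDedupA] at hred
  have hmemred : ∀ x, x ∈ red ↔ x ∈ lista := by
    intro x; simpa [hred] using pv_mem_dedup_fold lista [] x
  have hrednil : red ≠ [] := by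
    obtain ⟨a, t, rfl⟩ := List.exists_cons_of_ne_nil hpre
    intro h
    have := (hmemred a).2 (by simp)
    simp [h] at this
  -- the two maxima agree
  obtain ⟨mr, hmr⟩ := Option.ne_none_iff_exists'.1
    ((PySem.List.max?_eq_none_iff red (fun y => y)).not.2 hrednil)
  obtain ⟨ml, hml⟩ := Option.ne_none_iff_exists'.1
    ((PySem.List.max?_eq_none_iff lista (fun y => y)).not.2 hpre)
  have hmrmem : mr ∈ red := PySem.List.max?_mem hmr
  have hmlmem : ml ∈ lista := PySem.List.max?_mem hml
  have hmax : mr = ml := by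
    have h1 : mr ≤ ml := PySem.List.max?_isMax hml mr ((hmemred mr).1 hmrmem)
    have h2 : ml ≤ mr := PySem.List.max?_isMax hmr ml ((hmemred ml).2 hmlmem)
    omega
  -- A's index/pop phase removes the unique occurrence of the max
  obtain ⟨i, hi⟩ := Option.isSome_iff_exists.1
    ((PySem.List.index?_isSome_iff red mr).2 hmrmem)
  obtain ⟨pre, suf, hsplit, hlen, hpremem⟩ := (PySem.List.index?_eq_some_iff red mr i).1 hi
  have hilt : i < red.length := by
    rw [hsplit, ← hlen]; simp
  have hpop : PySem.List.pop? red (i : Int) = some (red[i], red.eraseIdx i) :=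
    PySem.List.pop?_natCast red i hilt
  simp only [hmr, hi, hpop, hml]
  have hnodup : red.Nodup := hred ▸ pv_nodup_dedup_fold lista [] (by simp)
  have hsufmem : mr ∉ suf := by
    rw [hsplit] at hnodup
    exact (List.nodup_cons.1 hnodup.of_append_right).1
  -- rewrite both sides to pre ++ suf
  have hA : red.eraseIdx i = pre ++ suf := by
    rw [hsplit, ← hlen, pv_eraseIdx_append]
  have hB : lista.foldl (fun acc n => if n ≠ ml ∧ n ∉ acc then acc ++ [n] else acc) []
      = red.filter (fun n => decide (n ≠ ml)) := by
    rw [hred]; simpa using pv_guarded_eq_filter ml lista []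
  rw [hA, hB, ← hmax, hsplit]
  simp only [decide_not, List.filter_append, List.filter_cons,
    pv_filter_of_not_mem pre mr hpremem, pv_filter_of_not_mem suf mr hsufmem,
    decide_true, Bool.not_true]
  simp
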